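-- pv_equiv track=rewrite | github.com/christiancadieux/BERT | qa.py | correct_answer
-- ===== SOURCE A (Python) =====
-- def correct_answer(answer):
--     rc = ""
--     for word in answer.split():
--         if word[0:2] == '##':
--             rc += word[2:]
--         else:
--             rc += ' ' + word
--     return rc
-- ===== SOURCE B (Python) =====
-- def correct_answer(answer):
--     words = answer.split()
--     if not words:
--         return ""
--     return (" " + " ".join(words)).replace(" ##", "")
-- ===== Notes on version B (the rewrite author's own statement) =====
-- stated objective: idiomatic
-- what changed: Replaces the per-token accumulation loop with a branch on '##' by a single join of the split words followed by one global replace of the ' ##' separator pattern (plus the empty guard).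
import Mathlib
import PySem

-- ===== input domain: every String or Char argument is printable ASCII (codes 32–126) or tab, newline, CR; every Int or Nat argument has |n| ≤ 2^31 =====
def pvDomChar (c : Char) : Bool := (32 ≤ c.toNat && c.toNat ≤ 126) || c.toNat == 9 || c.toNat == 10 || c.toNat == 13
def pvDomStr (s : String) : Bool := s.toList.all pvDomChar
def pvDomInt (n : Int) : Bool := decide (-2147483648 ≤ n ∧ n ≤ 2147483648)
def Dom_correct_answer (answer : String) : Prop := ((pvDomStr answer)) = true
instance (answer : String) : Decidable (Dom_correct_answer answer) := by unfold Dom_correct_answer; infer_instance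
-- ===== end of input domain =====

-- B replaces A's per-token accumulation loop (branching on '##') by one join of the split
-- words followed by a single global replace of " ##" — more idiomatic, same cost.

-- ===== PORT A =====
def correct_answer (answer : String) : String :=
  String.ofList ((PySem.Chars.split₀ answer.toList).foldl
    (fun rc word =>
      if PySem.Chars.slice word (some 0) (some 2) = ['#', '#'] then
        rc ++ PySem.Chars.slice word (some 2) none
      else
        rc ++ [' '] ++ word) [])

-- ===== PORT B =====
def correct_answer_alt (answer : String) : String :=
  let words := PySem.Chars.split₀ answer.toList
  if words.isEmpty then ""
  else String.ofList (PySem.Chars.replace ([' '] ++ PySem.Chars.join [' '] words) [' ', '#', '#'] [])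

-- ===== PRECONDITION & SPEC =====
def Spec_correct_answer (answer : String) (out : String) : Prop := out = correct_answer_alt answer
instance (answer : String) (out : String) : Decidable (Spec_correct_answer answer out) := by unfold Spec_correct_answer; infer_instance

-- ===== CLAIM (what is proved, stated in full; the proofs are below) =====
def Claim_equal_correct_answer : Prop := ∀ (answer : String), Dom_correct_answer answer → Spec_correct_answer answer (correct_answer answer)

-- ===== LEMMAS AND PROOFS =====

-- the per-word transformation A applies
def pvF (w : List Char) : List Char :=
  if PySem.Chars.slice w (some 0) (some 2) = ['#', '#'] then PySem.Chars.slice w (some 2) none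
  else [' '] ++ w

-- the " " + " ".join(words) string, word by word
def pvS (words : List (List Char)) : List Char := words.flatMap (fun w => ' ' :: w)

-- a word produced by split(): nonempty, without whitespace characters
def pvGood (w : List Char) : Prop := w ≠ [] ∧ ∀ c ∈ w, PySem.Chars.isspace c = false

theorem pvF_eq (w : List Char) :
    pvF w = if w.take 2 = ['#', '#'] then w.drop 2 else [' '] ++ w := by
  have h1 : PySem.Chars.slice w (some 0) (some 2) = w.take 2 := by
    simp only [PySem.Chars.slice_eq_listSlice, PySem.List.slice_zero_start]
    rw [PySem.List.slice_to w (b := 2) (by norm_num)]; rfl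
  have h2 : PySem.Chars.slice w (some 2) none = w.drop 2 := by
    simp only [PySem.Chars.slice_eq_listSlice]
    rw [PySem.List.slice_from w (a := 2) (by norm_num)]; rfl
  unfold pvF
  rw [h1, h2]

theorem pvA_foldl (words : List (List Char)) (acc : List Char) :
    words.foldl
      (fun rc word =>
        if PySem.Chars.slice word (some 0) (some 2) = ['#', '#'] then
          rc ++ PySem.Chars.slice word (some 2) none
        else rc ++ [' '] ++ word) acc = acc ++ (words.map pvF).flatten := by
  induction words generalizing acc with
  | nil => simp
  | cons w ws ih =>
    simp only [List.foldl_cons, ih, List.map_cons, List.flatten_cons]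
    unfold pvF
    split_ifs <;> simp

theorem pv_split_go_good (s : List Char) :
    ∀ (cur : List Char) (acc : List (List Char)),
      (∀ c ∈ cur, PySem.Chars.isspace c = false) → (∀ w ∈ acc, pvGood w) →
      ∀ w ∈ PySem.Chars.split₀.go s cur acc, pvGood w := by
  induction s with
  | nil =>
    intro cur acc hcur hacc w hw
    by_cases h : cur = []
    · subst h
      rw [show PySem.Chars.split₀.go [] [] acc = acc.reverse from by
            simp [PySem.Chars.split₀.go]] at hw
      exact hacc w (List.mem_reverse.mp hw)
    · rw [show PySem.Chars.split₀.go [] cur acc = (cur.reverse :: acc).reverse from by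
            simp [PySem.Chars.split₀.go, List.isEmpty_iff, h]] at hw
      rcases List.mem_cons.mp (List.mem_reverse.mp hw) with hw | hw
      · subst hw
        exact ⟨by simpa using h, fun c hc => hcur c (by simpa using hc)⟩
      · exact hacc w hw
  | cons c t ih =>
    intro cur acc hcur hacc w hw
    by_cases hsp : PySem.Chars.isspace c = true
    · by_cases h : cur = []
      · subst h
        simp only [PySem.Chars.split₀.go, hsp, if_true, List.isEmpty_nil] at hw
        exact ih [] acc (by simp) hacc w hw
      · simp only [PySem.Chars.split₀.go, hsp, if_true] at hw
        rw [if_neg (by simpa [List.isEmpty_iff] using h)] at hw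
        refine ih [] (cur.reverse :: acc) (by simp) ?_ w hw
        intro v hv
        rcases List.mem_cons.mp hv with hv | hv
        · subst hv
          exact ⟨by simpa using h, fun d hd => hcur d (by simpa using hd)⟩
        · exact hacc v hv
    · simp only [PySem.Chars.split₀.go, hsp] at hw
      refine ih (c :: cur) acc ?_ hacc w hw
      intro d hd
      rcases List.mem_cons.mp hd with hd | hd
      · subst hd; simpa using hsp
      · exact hcur d hd

theorem pv_split₀_good (s : List Char) : ∀ w ∈ PySem.Chars.split₀ s, pvGood w := by
  unfold PySem.Chars.split₀
  exact pv_split_go_good s [] [] (by simp) (by simp)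

theorem pv_go_nil (acc : List Char) (fuel : Nat) :
    PySem.Chars.replace.go [' ', '#', '#'] [] fuel [] acc = acc.reverse := by
  cases fuel <;> simp [PySem.Chars.replace.go]

theorem pv_go_skip (w : List Char) :
    ∀ (l acc : List Char) (fuel : Nat),
      (∀ c ∈ w, PySem.Chars.isspace c = false) → w.length ≤ fuel →
      PySem.Chars.replace.go [' ', '#', '#'] [] fuel (w ++ l) acc =
        PySem.Chars.replace.go [' ', '#', '#'] [] (fuel - w.length) l (w.reverse ++ acc) := by
  induction w with
  | nil => intro l acc fuel _ _; simp
  | cons c t ih =>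
    intro l acc fuel hns hlen
    simp only [List.length_cons] at hlen
    obtain ⟨n, rfl⟩ : ∃ n, fuel = n + 1 := ⟨fuel - 1, by omega⟩
    have hc : c ≠ ' ' := by
      intro h; subst h
      exact absurd (hns ' ' (by simp)) (by decide)
    have hpre : [' ', '#', '#'].isPrefixOf (c :: (t ++ l)) = false := by
      simp [List.isPrefixOf, Ne.symm hc]
    simp only [List.cons_append, PySem.Chars.replace.go, hpre, Bool.false_eq_true, if_false]
    rw [ih l (c :: acc) n (fun d hd => hns d (by simp [hd])) (by omega)]
    simp [Nat.succ_sub_succ]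

theorem pv_prefix_hh (w S : List Char) (hw : pvGood w)
    (hS : S = [] ∨ ∃ t, S = ' ' :: t) :
    ['#', '#'].isPrefixOf (w ++ S) = true ↔ w.take 2 = ['#', '#'] := by
  obtain ⟨hne, hns⟩ := hw
  match w with
  | [] => exact absurd rfl hne
  | [c] =>
    constructor
    · intro h
      rcases hS with rfl | ⟨t, rfl⟩
      · simp [List.isPrefixOf] at h
      · simp [List.isPrefixOf] at h
    · intro h; simp at h
  | c1 :: c2 :: t =>
    simp only [List.isPrefixOf, List.cons_append, List.take, List.cons.injEq, and_true]
    constructor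
    · intro h
      simp at h
      exact ⟨h.1.symm, h.2.symm⟩
    · intro ⟨h1, h2⟩
      simp [h1, h2]

theorem pv_pvS_shape (words : List (List Char)) :
    pvS words = [] ∨ ∃ t, pvS words = ' ' :: t := by
  cases words with
  | nil => left; rfl
  | cons w ws => right; exact ⟨w ++ pvS ws, rfl⟩

theorem pv_go_main (words : List (List Char)) :
    ∀ (acc : List Char) (fuel : Nat),
      (∀ w ∈ words, pvGood w) → (pvS words).length ≤ fuel →
      PySem.Chars.replace.go [' ', '#', '#'] [] fuel (pvS words) acc =
        acc.reverse ++ (words.map pvF).flatten := by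
  induction words with
  | nil => intro acc fuel _ _; simpa using pv_go_nil acc fuel
  | cons w ws ih =>
    intro acc fuel hgood hlen
    have hgw : pvGood w := hgood w (by simp)
    have hgws : ∀ v ∈ ws, pvGood v := fun v hv => hgood v (by simp [hv])
    rw [show pvS (w :: ws) = ' ' :: (w ++ pvS ws) from by simp [pvS]] at hlen ⊢
    simp only [List.length_cons, List.length_append] at hlen
    obtain ⟨n, rfl⟩ : ∃ n, fuel = n + 1 := ⟨fuel - 1, by omega⟩
    by_cases hcase : w.take 2 = ['#', '#']
    · obtain ⟨t, rfl⟩ : ∃ t, w = '#' :: '#' :: t := by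
        match w, hcase with
        | c1 :: c2 :: t, h =>
          simp at h
          exact ⟨t, by simp [h.1, h.2]⟩
      have step : PySem.Chars.replace.go [' ', '#', '#'] [] (n + 1)
          (' ' :: (('#' :: '#' :: t) ++ pvS ws)) acc =
          PySem.Chars.replace.go [' ', '#', '#'] [] n (t ++ pvS ws) acc := by
        simp [PySem.Chars.replace.go, List.isPrefixOf]
      have hnt : ∀ c ∈ t, PySem.Chars.isspace c = false := fun c hc =>
        hgw.2 c (by simp [hc])
      simp only [List.length_cons] at hlen
      rw [step, pv_go_skip t (pvS ws) acc n hnt (by omega),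
        ih (t.reverse ++ acc) (n - t.length) hgws (by omega)]
      simp [pvF_eq]
    · have hpf : [' ', '#', '#'].isPrefixOf (' ' :: (w ++ pvS ws)) = false := by
        rw [show [' ', '#', '#'].isPrefixOf (' ' :: (w ++ pvS ws)) =
              ['#', '#'].isPrefixOf (w ++ pvS ws) from by simp [List.isPrefixOf]]
        rw [Bool.eq_false_iff]
        intro hb
        exact hcase ((pv_prefix_hh w (pvS ws) hgw (pv_pvS_shape ws)).mp hb)
      have step : PySem.Chars.replace.go [' ', '#', '#'] [] (n + 1)
          (' ' :: (w ++ pvS ws)) acc =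
          PySem.Chars.replace.go [' ', '#', '#'] [] n (w ++ pvS ws) (' ' :: acc) := by
        simp [PySem.Chars.replace.go, hpf]
      rw [step, pv_go_skip w (pvS ws) (' ' :: acc) n hgw.2 (by omega),
        ih (w.reverse ++ ' ' :: acc) (n - w.length) hgws (by omega)]
      simp [pvF_eq, hcase]

theorem pv_join_eq_pvS (w : List Char) (ws : List (List Char)) :
    [' '] ++ PySem.Chars.join [' '] (w :: ws) = pvS (w :: ws) := by
  induction ws generalizing w with
  | nil => simp [PySem.Chars.join, List.intercalate, pvS]
  | cons w2 ws' ih =>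
    have hstep : PySem.Chars.join [' '] (w :: w2 :: ws') =
        w ++ [' '] ++ PySem.Chars.join [' '] (w2 :: ws') := by
      simp [PySem.Chars.join, List.intercalate, List.intersperse]
    rw [hstep, pvS, List.flatMap_cons]
    have h2 := ih w2
    simp only [pvS] at h2 ⊢
    rw [show [' '] ++ (w ++ [' '] ++ PySem.Chars.join [' '] (w2 :: ws')) =
        (' ' :: w) ++ ([' '] ++ PySem.Chars.join [' '] (w2 :: ws')) from by simp, h2]

-- ===== VERDICT (by name: the statement is the Claim_ definition above) =====
theorem correct_answer_spec : Claim_equal_correct_answer := by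
  intro answer _
  unfold Spec_correct_answer correct_answer correct_answer_alt
  rw [pvA_foldl]
  cases hw : PySem.Chars.split₀ answer.toList with
  | nil => simp
  | cons w ws =>
    simp only [List.isEmpty_cons, Bool.false_eq_true, if_false]
    rw [pv_join_eq_pvS]
    have hgood : ∀ v ∈ w :: ws, pvGood v := by
      intro v hv; exact pv_split₀_good answer.toList v (hw ▸ hv)
    rw [show PySem.Chars.replace (pvS (w :: ws)) [' ', '#', '#'] [] =
        PySem.Chars.replace.go [' ', '#', '#'] [] (pvS (w :: ws)).length (pvS (w :: ws)) [] from by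
          simp [PySem.Chars.replace]]
    rw [pv_go_main (w :: ws) [] (pvS (w :: ws)).length hgood (le_refl _)]
    simp
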